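-- pv_equiv track=rewrite | github.com/sowa-gregory/hashcat_maskgen | mask_substring.py | generate_masks
-- ===== SOURCE A (Python) =====
-- def generate_masks(pass_len, substr) -> list:
--     current_mask = [-1]*pass_len
--     masks = []
--
--     def gen_char(char_num):
--         if char_num == len(substr):
--             masks.append(current_mask.copy())
--             return
--
--         for i in range(pass_len):
--             if current_mask[i] == -1:
--                 current_mask[i] = char_num
--                 gen_char(char_num+1)
--                 current_mask[i] = -1
--     gen_char(0)
--     return masks
-- ===== SOURCE B (Python) =====
-- def generate_masks(pass_len, substr) -> list:
--     masks = [[-1] * pass_len]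
--     for char_num in range(len(substr)):
--         layer = []
--         for m in masks:
--             for i in range(pass_len):
--                 if m[i] == -1:
--                     new = m.copy()
--                     new[i] = char_num
--                     layer.append(new)
--         masks = layer
--     return masks
-- ===== Notes on version B (the rewrite author's own statement) =====
-- stated objective: alternative
-- what changed: Replaced the recursive backtracking with a mutated shared mask by an iterative breadth-first layer expansion: for each character a new generation of masks is built by placing that character in every free slot of every partial mask.
import Mathlib
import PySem

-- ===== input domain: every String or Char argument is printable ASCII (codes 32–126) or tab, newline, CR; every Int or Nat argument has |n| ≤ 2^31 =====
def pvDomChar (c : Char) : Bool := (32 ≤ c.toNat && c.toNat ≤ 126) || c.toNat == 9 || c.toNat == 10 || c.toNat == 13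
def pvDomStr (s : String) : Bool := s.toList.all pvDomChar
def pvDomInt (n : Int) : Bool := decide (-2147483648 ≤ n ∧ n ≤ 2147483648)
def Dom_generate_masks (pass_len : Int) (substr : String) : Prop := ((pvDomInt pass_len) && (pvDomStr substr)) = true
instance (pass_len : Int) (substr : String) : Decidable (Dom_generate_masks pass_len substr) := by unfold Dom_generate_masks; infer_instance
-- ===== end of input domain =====

-- B replaces A's recursive backtracking with an iterative layer-by-layer expansion (alternative, same cost).

-- ===== PORT A =====
-- gen_char: the remaining characters to place are the structural fuel (char_num == len(substr)
-- is reached exactly when the fuel is exhausted, since char_num starts at 0 and only increments).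
-- Backtracking ('current_mask[i] = -1' after the call) is the functional passing of the
-- unmodified `cur` to the next loop iteration.
def pvGenChar (passLen : Int) (cur : List Int) (charNum : Int) :
    Nat → List (List Int) → List (List Int)
  | 0, masks => masks ++ [cur]
  | rem+1, masks =>
      (PySem.List.pyRange 0 passLen 1).foldl
        (fun acc i =>
          if PySem.List.pyGet? cur i = some (-1) then
            pvGenChar passLen (cur.set i.toNat charNum) (charNum + 1) rem acc
          else acc)
        masks

def generate_masks (pass_len : Int) (substr : String) : List (List Int) :=
  pvGenChar pass_len (List.replicate pass_len.toNat (-1)) 0 substr.toList.length []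

-- ===== PORT B =====
def generate_masks_alt (pass_len : Int) (substr : String) : List (List Int) :=
  (List.range substr.toList.length).foldl
    (fun (masks : List (List Int)) (charNum : Nat) =>
      masks.foldl
        (fun layer m =>
          (PySem.List.pyRange 0 pass_len 1).foldl
            (fun layer i =>
              if PySem.List.pyGet? m i = some (-1) then
                layer ++ [m.set i.toNat (charNum : Int)]
              else layer)
            layer)
        [])
    [List.replicate pass_len.toNat (-1)]

-- ===== PRECONDITION & SPEC =====
def Spec_generate_masks (pass_len : Int) (substr : String) (out : List (List Int)) : Prop := out = generate_masks_alt pass_len substr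
instance (pass_len : Int) (substr : String) (out : List (List Int)) : Decidable (Spec_generate_masks pass_len substr out) := by unfold Spec_generate_masks; infer_instance

-- ===== CLAIM (what is proved, stated in full; the proofs are below) =====
def Claim_equal_generate_masks : Prop := ∀ (pass_len : Int) (substr : String), Dom_generate_masks pass_len substr → Spec_generate_masks pass_len substr (generate_masks pass_len substr)

-- ===== LEMMAS AND PROOFS =====

-- the placements of character c into the free slots of mask m, in slot order
def pvPlace (passLen : Int) (m : List Int) (c : Int) : List (List Int) :=
  ((PySem.List.pyRange 0 passLen 1).filter
      (fun i => PySem.List.pyGet? m i = some (-1))).map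
    (fun i => m.set i.toNat c)

-- A's accumulator only ever grows by appending
theorem pvGenChar_append (passLen : Int) :
    ∀ (rem : Nat) (cur : List Int) (charNum : Int) (masks : List (List Int)),
      pvGenChar passLen cur charNum rem masks =
        masks ++ pvGenChar passLen cur charNum rem [] := by
  intro rem
  induction rem with
  | zero => intro cur charNum masks; simp [pvGenChar]
  | succ rem ih =>
      intro cur charNum masks
      simp only [pvGenChar]
      generalize PySem.List.pyRange 0 passLen 1 = l
      induction l generalizing masks with
      | nil => simp
      | cons i l ihl =>
          simp only [List.foldl_cons]
          by_cases h : PySem.List.pyGet? cur i = some (-1)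
          · rw [if_pos h, if_pos h]
            rw [ihl, ihl (pvGenChar passLen (cur.set i.toNat charNum) (charNum + 1) rem [])]
            rw [ih _ _ masks, List.append_assoc]
          · simp only [if_neg h]
            exact ihl masks

-- one recursion level of A expands each placement of pvPlace
theorem pvGenChar_succ (passLen : Int) (rem : Nat) (cur : List Int) (charNum : Int) :
    pvGenChar passLen cur charNum (rem + 1) [] =
      (pvPlace passLen cur charNum).flatMap
        (fun m => pvGenChar passLen m (charNum + 1) rem []) := by
  simp only [pvGenChar, pvPlace]
  generalize PySem.List.pyRange 0 passLen 1 = l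
  induction l using List.reverseRecOn with
  | nil => simp
  | append_singleton l i ihl =>
      simp only [List.foldl_append, List.foldl_cons, List.foldl_nil,
        List.filter_append, List.map_append, List.flatMap_append]
      by_cases h : PySem.List.pyGet? cur i = some (-1)
      · rw [if_pos h]
        rw [pvGenChar_append passLen rem _ _ (List.foldl _ [] l), ihl]
        simp [h]
      · simp [h, ihl]

-- B's inner two loops over a generation = flatMap of pvPlace
theorem pvStep_eq_flatMap (passLen : Int) (c : Int) (ms : List (List Int)) :
    ms.foldl
        (fun layer m =>
          (PySem.List.pyRange 0 passLen 1).foldl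
            (fun layer i =>
              if PySem.List.pyGet? m i = some (-1) then
                layer ++ [m.set i.toNat c]
              else layer)
            layer)
        [] = ms.flatMap (fun m => pvPlace passLen m c) := by
  have inner : ∀ (m : List Int) (acc : List (List Int)),
      (PySem.List.pyRange 0 passLen 1).foldl
        (fun layer i =>
          if PySem.List.pyGet? m i = some (-1) then
            layer ++ [m.set i.toNat c]
          else layer) acc = acc ++ pvPlace passLen m c := by
    intro m acc
    simpa [pvPlace] using
      PySem.List.foldl_append_if (l := PySem.List.pyRange 0 passLen 1)
        (p := fun i => PySem.List.pyGet? m i = some (-1))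
        (f := fun i => m.set i.toNat c) (acc := acc)
  induction ms using List.reverseRecOn with
  | nil => simp
  | append_singleton ms m ih =>
      simp only [List.foldl_append, List.foldl_cons, List.foldl_nil, inner,
        List.flatMap_append]
      simp [List.flatMap_def]

-- main bridge: A's recursion at fuel rem starting at character c, summed over a
-- generation of partial masks, equals rem iterations of B's layer step
theorem pvBridge (passLen : Int) :
    ∀ (rem : Nat) (c : Nat) (ms : List (List Int)),
      (List.range' c rem).foldl
          (fun masks charNum =>
            masks.foldl
              (fun layer m =>
                (PySem.List.pyRange 0 passLen 1).foldl
                  (fun layer i =>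
                    if PySem.List.pyGet? m i = some (-1) then
                      layer ++ [m.set i.toNat (charNum : Int)]
                    else layer)
                  layer)
              [])
          ms =
        ms.flatMap (fun m => pvGenChar passLen m (c : Int) rem []) := by
  intro rem
  induction rem with
  | zero =>
      intro c ms
      simp [pvGenChar]
  | succ rem ih =>
      intro c ms
      rw [List.range'_succ, List.foldl_cons, pvStep_eq_flatMap, ih (c + 1)]
      rw [List.flatMap_assoc]
      congr 1
      funext m
      rw [pvGenChar_succ]
      congr 2

-- ===== VERDICT (by name: the statement is the Claim_ definition above) =====
theorem generate_masks_spec : Claim_equal_generate_masks := by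
  intro pass_len substr _
  unfold Spec_generate_masks generate_masks generate_masks_alt
  rw [List.range_eq_range', pvBridge]
  simp
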